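-- pv_equiv track=rewrite | github.com/jstringara/advent-of-code | 6/first_part.py | in_between_points
-- ===== SOURCE A (Python) =====
-- def in_between_points(starting_point: tuple[int, int], arrival_point: tuple[int, int]):
--     # if they are the same point
--     if starting_point == arrival_point:
--         return []
--
--     # check that at least one of the coordinates is the same
--     if starting_point[0] != arrival_point[0] and starting_point[1] != arrival_point[1]:
--         raise ValueError("Points are not in a straight line")
--
--     # we go left to right
--     if starting_point[0] == arrival_point[0] and starting_point[1] < arrival_point[1]:
--         return [
--             ((starting_point[0], j), "->")
--             for j in range(starting_point[1] + 1, arrival_point[1])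
--         ]
--     # we go right to left
--     if starting_point[0] == arrival_point[0] and starting_point[1] > arrival_point[1]:
--         return list(
--             reversed(
--                 [
--                     ((starting_point[0], j), "<-")
--                     for j in range(arrival_point[1] + 1, starting_point[1])
--                 ]
--             )
--         )
--     # if we go from top to bottom
--     if starting_point[1] == arrival_point[1] and starting_point[0] < arrival_point[0]:
--         return [
--             ((i, starting_point[1]), "v")
--             for i in range(starting_point[0] + 1, arrival_point[0])
--         ]
--     # if we go from bottom to top
--     if starting_point[1] == arrival_point[1] and starting_point[0] > arrival_point[0]:
--         return list(
--             reversed(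
--                 [
--                     ((i, starting_point[1]), "^")
--                     for i in range(arrival_point[0] + 1, starting_point[0])
--                 ]
--             )
--         )
--
--     # should never reach here
--     raise ValueError("Invalid points")
-- ===== SOURCE B (Python) =====
-- def in_between_points(starting_point: tuple[int, int], arrival_point: tuple[int, int]):
--     if starting_point == arrival_point:
--         return []
--     dr0 = arrival_point[0] - starting_point[0]
--     dc0 = arrival_point[1] - starting_point[1]
--     if dr0 != 0 and dc0 != 0:
--         raise ValueError("Points are not in a straight line")
--     dr = (dr0 > 0) - (dr0 < 0)
--     dc = (dc0 > 0) - (dc0 < 0)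
--     arrow = '->' if dc > 0 else '<-' if dc < 0 else 'v' if dr > 0 else '^'
--     out = []
--     i, j = starting_point[0] + dr, starting_point[1] + dc
--     while (i, j) != arrival_point:
--         out.append(((i, j), arrow))
--         i += dr
--         j += dc
--     return out
-- ===== Notes on version B (the rewrite author's own statement) =====
-- stated objective: simpler
-- what changed: Replaces the four branch-specific range comprehensions (two of them reversed) by one sign-driven while loop that walks from start toward arrival with a unit step picked by sign(), choosing the arrow from the step signs.
import Mathlib
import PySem

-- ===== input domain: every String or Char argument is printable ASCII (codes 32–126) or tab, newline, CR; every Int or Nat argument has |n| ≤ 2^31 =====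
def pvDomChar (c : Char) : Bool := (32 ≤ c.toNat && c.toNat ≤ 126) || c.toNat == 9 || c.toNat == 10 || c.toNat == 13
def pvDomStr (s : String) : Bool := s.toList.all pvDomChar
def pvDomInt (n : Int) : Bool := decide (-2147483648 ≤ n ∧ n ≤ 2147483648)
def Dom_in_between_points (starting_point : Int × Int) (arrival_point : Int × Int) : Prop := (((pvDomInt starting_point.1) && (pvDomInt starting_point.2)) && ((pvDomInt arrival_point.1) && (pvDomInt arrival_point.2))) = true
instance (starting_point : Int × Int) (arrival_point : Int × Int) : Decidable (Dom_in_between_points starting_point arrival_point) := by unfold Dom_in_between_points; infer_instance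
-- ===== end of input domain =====

-- B replaces A's four branch-specific range comprehensions (two reversed) by one
-- sign-driven walk from start toward arrival; same cost, simpler decomposition.


-- ===== PORT A =====
def in_between_points (starting_point : Int × Int) (arrival_point : Int × Int) : List ((Int × Int) × String) :=
  if starting_point = arrival_point then []
  else if starting_point.1 ≠ arrival_point.1 ∧ starting_point.2 ≠ arrival_point.2 then
    []  -- Python: raise ValueError("Points are not in a straight line"); excluded by Pre_
  else if starting_point.1 = arrival_point.1 ∧ starting_point.2 < arrival_point.2 then
    (PySem.List.pyRange (starting_point.2 + 1) arrival_point.2).map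
      (fun j => ((starting_point.1, j), "->"))
  else if starting_point.1 = arrival_point.1 ∧ starting_point.2 > arrival_point.2 then
    ((PySem.List.pyRange (arrival_point.2 + 1) starting_point.2).map
      (fun j => ((starting_point.1, j), "<-"))).reverse
  else if starting_point.2 = arrival_point.2 ∧ starting_point.1 < arrival_point.1 then
    (PySem.List.pyRange (starting_point.1 + 1) arrival_point.1).map
      (fun i => ((i, starting_point.2), "v"))
  else if starting_point.2 = arrival_point.2 ∧ starting_point.1 > arrival_point.1 then
    ((PySem.List.pyRange (arrival_point.1 + 1) starting_point.1).map
      (fun i => ((i, starting_point.2), "^"))).reverse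
  else []  -- Python: raise ValueError("Invalid points"); unreachable

-- ===== PORT B =====
-- the while loop of Source B; the fuel argument is its exact trip count |dr0|+|dc0|-1
def bLoop (i j dr dc : Int) (arrow : String) : Nat → List ((Int × Int) × String)
  | 0 => []
  | n + 1 => ((i, j), arrow) :: bLoop (i + dr) (j + dc) dr dc arrow n

def in_between_points_alt (starting_point : Int × Int) (arrival_point : Int × Int) : List ((Int × Int) × String) :=
  if starting_point = arrival_point then []
  else
    let dr0 := arrival_point.1 - starting_point.1
    let dc0 := arrival_point.2 - starting_point.2
    if dr0 ≠ 0 ∧ dc0 ≠ 0 then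
      []  -- Python: raise ValueError("Points are not in a straight line"); excluded by Pre_
    else
      let dr : Int := if dr0 > 0 then 1 else if dr0 < 0 then -1 else 0
      let dc : Int := if dc0 > 0 then 1 else if dc0 < 0 then -1 else 0
      let arrow := if dc > 0 then "->" else if dc < 0 then "<-" else if dr > 0 then "v" else "^"
      bLoop (starting_point.1 + dr) (starting_point.2 + dc) dr dc arrow
        (dr0.natAbs + dc0.natAbs - 1)

-- ===== PRECONDITION & SPEC =====
-- Pre_ excludes exactly the non-collinear inputs, on which A raises ValueError.
def Pre_in_between_points (starting_point : Int × Int) (arrival_point : Int × Int) : Prop :=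
  starting_point.1 = arrival_point.1 ∨ starting_point.2 = arrival_point.2
instance (starting_point : Int × Int) (arrival_point : Int × Int) : Decidable (Pre_in_between_points starting_point arrival_point) := by unfold Pre_in_between_points; infer_instance

def pvWitness_in_between_points : (Int × Int) × (Int × Int) := ((1, 1), (1, 5))

def Spec_in_between_points (starting_point : Int × Int) (arrival_point : Int × Int) (out : List ((Int × Int) × String)) : Prop := out = in_between_points_alt starting_point arrival_point
instance (starting_point : Int × Int) (arrival_point : Int × Int) (out : List ((Int × Int) × String)) : Decidable (Spec_in_between_points starting_point arrival_point out) := by unfold Spec_in_between_points; infer_instance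

-- ===== CLAIM (what is proved, stated in full; the proofs are below) =====
def Claim_equal_in_between_points : Prop := ∀ (starting_point : Int × Int) (arrival_point : Int × Int), Dom_in_between_points starting_point arrival_point → Pre_in_between_points starting_point arrival_point → Spec_in_between_points starting_point arrival_point (in_between_points starting_point arrival_point)

-- ===== LEMMAS AND PROOFS =====

theorem bLoop_asc_h (r : Int) (ar : String) (n : Nat) : ∀ c : Int,
    bLoop r c 0 1 ar n = (PySem.List.pyRange c (c + n)).map (fun j => ((r, j), ar)) := by
  induction n with
  | zero => intro c; simp [bLoop]
  | succ n ih =>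
    intro c
    rw [bLoop, PySem.List.pyRange_one_cons (by push_cast; omega)]
    simp only [add_zero]
    rw [ih (c + 1)]
    congr 3
    all_goals omega

theorem bLoop_rev_h (r : Int) (ar : String) (n : Nat) : ∀ c : Int,
    (bLoop r c 0 (-1) ar n).reverse
      = (PySem.List.pyRange (c - n + 1) (c + 1)).map (fun j => ((r, j), ar)) := by
  induction n with
  | zero => intro c; simp [bLoop]
  | succ n ih =>
    intro c
    rw [bLoop]
    simp only [add_zero, List.reverse_cons]
    rw [ih (c + -1),
      show (c : Int) + -1 - n + 1 = c - (n + 1 : Nat) + 1 by push_cast; ring,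
      show (c : Int) + -1 + 1 = c - (n + 1 : Nat) + 1 + n by push_cast; ring,
      show (c : Int) + 1 = (c - (n + 1 : Nat) + 1 + n) + 1 by push_cast; ring,
      PySem.List.pyRange_one_succ_right (by omega)]
    simp only [List.map_append, List.map_cons, List.map_nil]
    congr 4
    all_goals omega

theorem bLoop_desc_h (r : Int) (ar : String) (n : Nat) (c : Int) :
    bLoop r c 0 (-1) ar n
      = ((PySem.List.pyRange (c - n + 1) (c + 1)).map (fun j => ((r, j), ar))).reverse := by
  rw [← bLoop_rev_h r ar n c, List.reverse_reverse]

theorem bLoop_asc_v (c : Int) (ar : String) (n : Nat) : ∀ r : Int,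
    bLoop r c 1 0 ar n = (PySem.List.pyRange r (r + n)).map (fun i => ((i, c), ar)) := by
  induction n with
  | zero => intro r; simp [bLoop]
  | succ n ih =>
    intro r
    rw [bLoop, PySem.List.pyRange_one_cons (by push_cast; omega)]
    simp only [add_zero]
    rw [ih (r + 1)]
    congr 3
    all_goals omega

theorem bLoop_rev_v (c : Int) (ar : String) (n : Nat) : ∀ r : Int,
    (bLoop r c (-1) 0 ar n).reverse
      = (PySem.List.pyRange (r - n + 1) (r + 1)).map (fun i => ((i, c), ar)) := by
  induction n with
  | zero => intro r; simp [bLoop]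
  | succ n ih =>
    intro r
    rw [bLoop]
    simp only [add_zero, List.reverse_cons]
    rw [ih (r + -1),
      show (r : Int) + -1 - n + 1 = r - (n + 1 : Nat) + 1 by push_cast; ring,
      show (r : Int) + -1 + 1 = r - (n + 1 : Nat) + 1 + n by push_cast; ring,
      show (r : Int) + 1 = (r - (n + 1 : Nat) + 1 + n) + 1 by push_cast; ring,
      PySem.List.pyRange_one_succ_right (by omega)]
    simp only [List.map_append, List.map_cons, List.map_nil]
    congr 4
    all_goals omega

theorem bLoop_desc_v (c : Int) (ar : String) (n : Nat) (r : Int) :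
    bLoop r c (-1) 0 ar n
      = ((PySem.List.pyRange (r - n + 1) (r + 1)).map (fun i => ((i, c), ar))).reverse := by
  rw [← bLoop_rev_v c ar n r, List.reverse_reverse]

-- ===== VERDICT (by name: the statement is the Claim_ definition above) =====
theorem in_between_points_spec : Claim_equal_in_between_points := by
  intro s a _ hpre
  obtain ⟨s1, s2⟩ := s
  obtain ⟨a1, a2⟩ := a
  unfold Spec_in_between_points in_between_points in_between_points_alt
  dsimp only
  by_cases heq : ((s1, s2) : Int × Int) = (a1, a2)
  · simp [heq]
  · rw [if_neg heq, if_neg heq]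
    rcases hpre with h1 | h2
    · replace h1 : s1 = a1 := h1
      subst h1
      rcases lt_trichotomy s2 a2 with hlt | heq2 | hgt
      · rw [if_neg (by simp), if_pos ⟨rfl, hlt⟩,
          if_neg (by omega : ¬(s1 - s1 ≠ 0 ∧ a2 - s2 ≠ 0)),
          if_neg (by omega : ¬(s1 - s1 > 0)), if_neg (by omega : ¬(s1 - s1 < 0)),
          if_pos (by omega : a2 - s2 > 0), if_pos (by norm_num : (1 : Int) > 0)]
        simp only [sub_self, Int.natAbs_zero, zero_add, add_zero]
        rw [bLoop_asc_h]
        congr 3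
        all_goals omega
      · exact absurd (by rw [heq2]) heq
      · rw [if_neg (by simp), if_neg (by omega : ¬(s1 = s1 ∧ s2 < a2)), if_pos ⟨rfl, hgt⟩,
          if_neg (by omega : ¬(s1 - s1 ≠ 0 ∧ a2 - s2 ≠ 0)),
          if_neg (by omega : ¬(s1 - s1 > 0)), if_neg (by omega : ¬(s1 - s1 < 0)),
          if_neg (by omega : ¬(a2 - s2 > 0)), if_pos (by omega : a2 - s2 < 0),
          if_neg (by norm_num : ¬((-1 : Int) > 0)), if_pos (by norm_num : (-1 : Int) < 0)]
        simp only [sub_self, Int.natAbs_zero, zero_add, add_zero]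
        rw [bLoop_desc_h]
        congr 4
        all_goals omega
    · replace h2 : s2 = a2 := h2
      subst h2
      rcases lt_trichotomy s1 a1 with hlt | heq1 | hgt
      · rw [if_neg (by simp), if_neg (by omega : ¬(s1 = a1 ∧ s2 < s2)),
          if_neg (by omega : ¬(s1 = a1 ∧ s2 > s2)), if_pos ⟨rfl, hlt⟩,
          if_neg (by omega : ¬(a1 - s1 ≠ 0 ∧ s2 - s2 ≠ 0)),
          if_neg (by omega : ¬(s2 - s2 > 0)), if_neg (by omega : ¬(s2 - s2 < 0)),
          if_pos (by omega : a1 - s1 > 0),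
          if_neg (by norm_num : ¬((0 : Int) > 0)), if_neg (by norm_num : ¬((0 : Int) < 0)),
          if_pos (by norm_num : (1 : Int) > 0)]
        simp only [sub_self, Int.natAbs_zero, add_zero]
        rw [bLoop_asc_v]
        congr 3
        all_goals omega
      · exact absurd (by rw [heq1]) heq
      · rw [if_neg (by simp), if_neg (by omega : ¬(s1 = a1 ∧ s2 < s2)),
          if_neg (by omega : ¬(s1 = a1 ∧ s2 > s2)),
          if_neg (by omega : ¬(s2 = s2 ∧ s1 < a1)), if_pos ⟨rfl, hgt⟩,
          if_neg (by omega : ¬(a1 - s1 ≠ 0 ∧ s2 - s2 ≠ 0)),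
          if_neg (by omega : ¬(s2 - s2 > 0)), if_neg (by omega : ¬(s2 - s2 < 0)),
          if_neg (by omega : ¬(a1 - s1 > 0)), if_pos (by omega : a1 - s1 < 0),
          if_neg (by norm_num : ¬((0 : Int) > 0)), if_neg (by norm_num : ¬((0 : Int) < 0)),
          if_neg (by norm_num : ¬((-1 : Int) > 0))]
        simp only [sub_self, Int.natAbs_zero, add_zero]
        rw [bLoop_desc_v]
        congr 4
        all_goals omega
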